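-- pv_equiv track=rewrite | github.com/minhtnphan/rl_gomoku | minimax_utils.py | get_left_diags
-- ===== SOURCE A (Python) =====
-- import math
--
-- def get_left_diags(board, player):
--     size = len(board) if len(board) == len(board[0]) else 0
--     centered_diag = math.floor((2 * size - 1 - 8) / 2)
--
--     if size == 0:
--         return []
--
--     diags = ['']
--
--     # main diag
--     for i in range(size):
--         if board[i][i] == 3 - player:
--             diags[0] += 'x'
--         elif board[i][i] == 0:
--             diags[0] += 'o'
--         elif board[i][i] == player:
--             diags[0] += '*'
--
--     # get diags from center to left (\)
--     for i in range(centered_diag):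
--         d = ''
--         for j in range(size):
--             if (i + 1 + j) > size - 1 or board[i + 1 + j][j] == 3 - player:
--                 d += 'x'
--             elif board[i + 1 + j][j] == 0:
--                 d += 'o'
--             elif board[i + 1 + j][j] == player:
--                 d += '*'
--         diags.append(d)
--
--     # get diags from center to right (/)
--     for i in range(centered_diag):
--         d = ''
--         for j in range(size):
--             if (i + 1 + j) > size - 1 or board[j][i + 1 + j] == 3 - player:
--                 d += 'x'
--             elif board[j][i + 1 + j] == 0:
--                 d += 'o'
--             elif board[j][i + 1 + j] == player:
--                 d += '*'
--         diags.append(d)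
--
--     return diags
-- ===== SOURCE B (Python) =====
-- def get_left_diags(board, player):
--     n = len(board) if len(board) == len(board[0]) else 0
--     if n == 0:
--         return []
--     band = max(n - 5, 0)
--     # single row-major pass: scatter each cell's symbol into the bucket of its
--     # diagonal offset o = i - j (stored at index o + band); bands padded afterwards
--     buckets = [[] for _ in range(2 * band + 1)]
--     for i, row in enumerate(board):
--         for j in range(max(i - band, 0), min(i + band, n - 1) + 1):
--             buckets[i - j + band].append(
--                 'x' if row[j] == 3 - player else 'o' if row[j] == 0 else '*' if row[j] == player else '')
--     out = [''.join(buckets[band])]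
--     for o in range(1, band + 1):
--         out.append(''.join(buckets[band + o]) + 'x' * o)
--     for o in range(1, band + 1):
--         out.append(''.join(buckets[band - o]) + 'x' * o)
--     return out
-- ===== Notes on version B (the rewrite author's own statement) =====
-- stated objective: faster
-- what changed: B replaces A's three per-diagonal gather loops (each rescanning full board width with a per-cell off-board test and string +=) by one row-major scatter pass that appends each cell's symbol into a bucket array indexed by its diagonal offset i-j, visiting only the in-band cells, then emits the buckets with closed-form 'x'*o padding.
-- outside the precondition, e.g. on get_left_diags([[0, 0, 0], [0, 0], [0, 0, 0]], 1): A returns ['ooo'], B returns ['ooo']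
import Mathlib
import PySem

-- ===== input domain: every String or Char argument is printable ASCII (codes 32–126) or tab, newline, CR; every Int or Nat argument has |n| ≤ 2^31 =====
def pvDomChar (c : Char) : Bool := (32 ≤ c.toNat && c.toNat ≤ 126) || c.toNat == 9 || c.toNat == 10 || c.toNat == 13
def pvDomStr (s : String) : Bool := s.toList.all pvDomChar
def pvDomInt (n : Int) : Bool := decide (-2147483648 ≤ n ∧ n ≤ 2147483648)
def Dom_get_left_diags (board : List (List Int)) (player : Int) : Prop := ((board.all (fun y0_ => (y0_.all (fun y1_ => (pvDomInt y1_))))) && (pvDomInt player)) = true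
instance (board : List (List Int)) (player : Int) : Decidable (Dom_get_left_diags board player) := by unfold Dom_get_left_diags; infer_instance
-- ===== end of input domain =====

-- B replaces A's three per-diagonal gather loops by one row-major scatter pass that appends each
-- cell's symbol into a bucket array indexed by its diagonal offset i-j, then emits the buckets
-- with closed-form 'x'-padding (objective: faster by a constant factor, measured).


-- ===== PORT A =====
def get_left_diags (board : List (List Int)) (player : Int) : List String :=
  -- size = len(board) if len(board) == len(board[0]) else 0   (board[0]: Pre_ excludes board = [])
  let size : Int := if (board.length : Int) = ((PySem.List.pyGetD board 0 []).length : Int) then (board.length : Int) else 0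
  -- centered_diag = math.floor((2*size-1-8)/2)  (exact: the quotient of odd 2*size-9 by 2, floored)
  let centered_diag : Int := PySem.Int.floordiv (2 * size - 1 - 8) 2
  if size = 0 then []
  else
    -- main diag: diags[0] += …
    let d0 : String := (PySem.List.pyRange 0 size 1).foldl (fun d i =>
      let v := PySem.List.pyGetD (PySem.List.pyGetD board i []) i 0
      if v = 3 - player then d ++ "x"
      else if v = 0 then d ++ "o"
      else if v = player then d ++ "*"
      else d) ""
    let diags : List String := [d0]
    -- diags from center to left (\)
    let diags := (PySem.List.pyRange 0 centered_diag 1).foldl (fun ds i =>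
      ds ++ [(PySem.List.pyRange 0 size 1).foldl (fun d j =>
        let v := PySem.List.pyGetD (PySem.List.pyGetD board (i + 1 + j) []) j 0
        if (i + 1 + j) > size - 1 ∨ v = 3 - player then d ++ "x"
        else if v = 0 then d ++ "o"
        else if v = player then d ++ "*"
        else d) ""]) diags
    -- diags from center to right (/)
    let diags := (PySem.List.pyRange 0 centered_diag 1).foldl (fun ds i =>
      ds ++ [(PySem.List.pyRange 0 size 1).foldl (fun d j =>
        let v := PySem.List.pyGetD (PySem.List.pyGetD board j []) (i + 1 + j) 0
        if (i + 1 + j) > size - 1 ∨ v = 3 - player then d ++ "x"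
        else if v = 0 then d ++ "o"
        else if v = player then d ++ "*"
        else d) ""]) diags
    diags

-- ===== PORT B =====
-- B's cell classification ('x' if v == 3-player else 'o' if v == 0 else '*' if v == player else '')
def pvCls (player v : Int) : String :=
  if v = 3 - player then "x" else if v = 0 then "o" else if v = player then "*" else ""

-- buckets[i - j + band].append(c): the write index is in range on every input (band ≤ i-j+band ≤ 2*band
-- by the j-loop bounds), so pySetD (never raising) is exact here
def pvStepF (band i : Int) (g : Int → String) (bs : List (List String)) (j : Int) : List (List String) :=
  PySem.List.pySetD bs (i - j + band) (PySem.List.pyGetD bs (i - j + band) [] ++ [g j])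

-- one iteration of B's outer loop: for j in range(max(i-band,0), min(i+band,n-1)+1): …
def pvRowF (player band n : Int) (bs : List (List String)) (p : Int × List Int) : List (List String) :=
  (PySem.List.pyRange (max (p.1 - band) 0) (min (p.1 + band) (n - 1) + 1) 1).foldl
    (pvStepF band p.1 (fun j => pvCls player (PySem.List.pyGetD p.2 j 0))) bs

def get_left_diags_alt (board : List (List Int)) (player : Int) : List String :=
  let n : Int := if (board.length : Int) = ((PySem.List.pyGetD board 0 []).length : Int) then (board.length : Int) else 0
  if n = 0 then []
  else
    let band : Int := max (n - 5) 0
    -- buckets = [[] for _ in range(2*band+1)]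
    let buckets : List (List String) := (PySem.List.pyRange 0 (2 * band + 1) 1).map (fun _ => ([] : List String))
    -- for i, row in enumerate(board): for j in …: buckets[i-j+band].append(…)
    let buckets := (PySem.List.enumerate board).foldl (pvRowF player band n) buckets
    let out : List String := [PySem.Str.join "" (PySem.List.pyGetD buckets band [])]
    let out := out ++ (PySem.List.pyRange 1 (band + 1) 1).map (fun o =>
      PySem.Str.join "" (PySem.List.pyGetD buckets (band + o) [])
        ++ String.ofList (List.replicate o.toNat 'x'))  -- 'x' * o (exact: o ≥ 1 here)
    let out := out ++ (PySem.List.pyRange 1 (band + 1) 1).map (fun o =>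
      PySem.Str.join "" (PySem.List.pyGetD buckets (band - o) [])
        ++ String.ofList (List.replicate o.toNat 'x'))
    out

-- ===== PRECONDITION & SPEC =====
-- Pre_ excludes exactly the boards where A's indexing raises IndexError (the empty board, and
-- square-counted boards with a row shorter than the board); requiring every row to reach the board's
-- length also drops a few boards with an unaccessed short row on which both programs return the same value.
def Pre_get_left_diags (board : List (List Int)) (player : Int) : Prop :=
  board ≠ [] ∧ (board.length = (board.headD []).length → ∀ row ∈ board, board.length ≤ row.length)
instance (board : List (List Int)) (player : Int) : Decidable (Pre_get_left_diags board player) := by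
  unfold Pre_get_left_diags; infer_instance
def pvWitness_get_left_diags : List (List Int) × Int :=
  ([[1, 0, 2, 0, 0, 1], [0, 1, 0, 0, 2, 0], [2, 0, 1, 0, 0, 0],
    [0, 0, 0, 2, 0, 1], [0, 2, 0, 0, 1, 0], [1, 0, 0, 2, 0, 0]], 1)

def Spec_get_left_diags (board : List (List Int)) (player : Int) (out : List String) : Prop := out = get_left_diags_alt board player
instance (board : List (List Int)) (player : Int) (out : List String) : Decidable (Spec_get_left_diags board player out) := by unfold Spec_get_left_diags; infer_instance

-- ===== CLAIM (what is proved, stated in full; the proofs are below) =====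
def Claim_equal_get_left_diags : Prop := ∀ (board : List (List Int)) (player : Int), Dom_get_left_diags board player → Pre_get_left_diags board player → Spec_get_left_diags board player (get_left_diags board player)

-- ===== LEMMAS AND PROOFS =====

theorem pvJoinEmpty_nil : PySem.Str.join "" ([] : List String) = "" := rfl

theorem pvJoinEmpty_cons (p : String) (ps : List String) :
    PySem.Str.join "" (p :: ps) = p ++ PySem.Str.join "" ps := by
  cases ps with
  | nil => rw [pvJoinEmpty_nil, String.append_empty, ← String.toList_inj]
           simp [PySem.Str.toList_join, PySem.Chars.join_singleton]
  | cons q rest =>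
    rw [← String.toList_inj]
    simp [PySem.Str.toList_join, PySem.Chars.join_cons_cons]

theorem pvJoinEmpty_append (l1 l2 : List String) :
    PySem.Str.join "" (l1 ++ l2) = PySem.Str.join "" l1 ++ PySem.Str.join "" l2 := by
  induction l1 with
  | nil => rw [List.nil_append, pvJoinEmpty_nil, String.empty_append]
  | cons p t ih => simp only [List.cons_append, pvJoinEmpty_cons, ih, String.append_assoc]

theorem pvJoinReplicate (k : Nat) :
    PySem.Str.join "" (List.replicate k "x") = String.ofList (List.replicate k 'x') := by
  induction k with
  | zero => rfl
  | succ m ih => rw [List.replicate_succ, pvJoinEmpty_cons, ih, ← String.toList_inj]; simp [List.replicate_succ]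

theorem pvRangeNil {a b : Int} (h : b ≤ a) : PySem.List.pyRange a b = [] := by
  rw [List.eq_nil_iff_forall_not_mem]
  intro x hx
  rw [PySem.List.mem_pyRange_one] at hx
  omega

theorem pvRangeShift (a : Int) (k : Nat) :
    PySem.List.pyRange a (a + k) = (List.range k).map (fun t : Nat => a + (Nat.cast t : Int)) := by
  induction k with
  | zero => simp [pvRangeNil (le_refl a)]
  | succ m ih =>
    rw [show a + ((m+1 : Nat) : Int) = (a + m) + 1 by push_cast; ring,
      PySem.List.pyRange_one_succ_right (by omega), ih, List.range_succ]
    simp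

-- A's full-width band scan with per-cell boundary test equals the on-board prefix (a Nat-indexed
-- map) followed by closed-form 'x' padding
theorem pvDiagEq (N o' : Nat) (h2 : o' ≤ N) (fa : Int → String) (fb : Nat → String)
    (hmatch : ∀ j : Nat, j < N - o' → fa (j : Int) = fb j)
    (hx : ∀ j : Nat, N - o' ≤ j → j < N → fa (j : Int) = "x") :
    PySem.Str.join "" ((PySem.List.pyRange 0 (N : Int)).map fa)
      = PySem.Str.join "" ((List.range (N - o')).map fb)
        ++ String.ofList (List.replicate o' 'x') := by
  obtain ⟨M, hM⟩ : ∃ M, N = M + o' := ⟨N - o', by omega⟩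
  subst hM
  have hM' : M + o' - o' = M := by omega
  rw [hM', PySem.List.pyRange_zero_natCast, List.range_add, List.map_append, List.map_append,
    pvJoinEmpty_append]
  simp only [List.map_map]
  congr 1
  · refine congrArg _ (List.map_congr_left fun t ht => ?_)
    simp only [Function.comp_apply]
    exact hmatch t (by simp only [List.mem_range] at ht; omega)
  · rw [← pvJoinReplicate o']
    congr 1
    rw [List.eq_replicate_iff]
    refine ⟨by simp, fun b hb => ?_⟩
    simp only [List.mem_map, List.mem_range, Function.comp_apply] at hb
    obtain ⟨t, ht, rfl⟩ := hb
    exact hx (M + t) (by omega) (by omega)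

theorem pvChainEq (d : String) (player v : Int) :
    (if v = 3 - player then d ++ "x" else if v = 0 then d ++ "o" else if v = player then d ++ "*" else d)
      = d ++ pvCls player v := by
  unfold pvCls; split_ifs <;> simp [String.append_empty]

theorem pvChainEq' (d : String) (c : Prop) [inst : Decidable c] (player v : Int) :
    (if c ∨ v = 3 - player then d ++ "x" else if v = 0 then d ++ "o" else if v = player then d ++ "*" else d)
      = d ++ (if c ∨ v = 3 - player then "x" else if v = 0 then "o" else if v = player then "*" else "") := by
  split_ifs <;> simp [String.append_empty]

theorem pvFoldChain0 (l : List Int) (player : Int) (v : Int → Int) (s : String) :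
    l.foldl (fun d j => if v j = 3 - player then d ++ "x"
      else if v j = 0 then d ++ "o" else if v j = player then d ++ "*" else d) s
    = s ++ PySem.Str.join "" (l.map (fun j => pvCls player (v j))) := by
  induction l generalizing s with
  | nil => rw [List.foldl_nil, List.map_nil, pvJoinEmpty_nil, String.append_empty]
  | cons a tl ih =>
    rw [List.foldl_cons, ih, List.map_cons, pvJoinEmpty_cons, pvChainEq, String.append_assoc]

theorem pvFoldChain (l : List Int) (player : Int) (v : Int → Int) (c : Int → Prop)
    [inst : DecidablePred c] (s : String) :
    l.foldl (fun d j => if c j ∨ v j = 3 - player then d ++ "x"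
      else if v j = 0 then d ++ "o" else if v j = player then d ++ "*" else d) s
    = s ++ PySem.Str.join "" (l.map (fun j =>
        if c j ∨ v j = 3 - player then "x"
        else if v j = 0 then "o" else if v j = player then "*" else "")) := by
  induction l generalizing s with
  | nil => rw [List.foldl_nil, List.map_nil, pvJoinEmpty_nil, String.append_empty]
  | cons a tl ih =>
    rw [List.foldl_cons, ih, List.map_cons, pvJoinEmpty_cons, pvChainEq', String.append_assoc]

-- what B's scatter pass appends to bucket k while processing rows rs (row index counter s)
def pvSeg (player band n : Int) (k : Nat) : List (List Int) → Int → List String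
  | [], _ => []
  | r :: rs, s =>
    (if max (s - band) 0 ≤ s + band - (k : Int) ∧ s + band - (k : Int) < min (s + band) (n - 1) + 1
      then [pvCls player (PySem.List.pyGetD r (s + band - (k : Int)) 0)] else [])
    ++ pvSeg player band n k rs (s + 1)

-- the inner j-loop touches each bucket at most once: bucket k gains exactly the cell (i, i+band-k)
-- when that column lies in [a, a+L)
theorem pvInnerL (band i : Int) (g : Int → String) (a : Int) (L : Nat)
    (bs : List (List String)) (hlen : (bs.length : Int) = 2 * band + 1)
    (ha : i - band ≤ a) (hb : a + (L : Int) ≤ i + band + 1) :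
    (((PySem.List.pyRange a (a + (L : Int))).foldl (pvStepF band i g) bs).length = bs.length)
    ∧ ∀ k : Nat, k < bs.length →
      ((PySem.List.pyRange a (a + (L : Int))).foldl (pvStepF band i g) bs).getD k []
        = bs.getD k [] ++ (if a ≤ i + band - (k : Int) ∧ i + band - (k : Int) < a + (L : Int)
            then [g (i + band - (k : Int))] else []) := by
  induction L with
  | zero =>
    rw [show a + ((0 : Nat) : Int) = a by omega, pvRangeNil (le_refl a), List.foldl_nil]
    exact ⟨rfl, fun k _ => by rw [if_neg (by omega), List.append_nil]⟩
  | succ m ih =>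
    obtain ⟨ihL, ihG⟩ := ih (by omega)
    rw [show a + ((m + 1 : Nat) : Int) = (a + (m : Nat)) + 1 by push_cast; ring,
      PySem.List.pyRange_one_succ_right (by omega), List.foldl_append, List.foldl_cons, List.foldl_nil]
    set R := (PySem.List.pyRange a (a + (m : Nat))).foldl (pvStepF band i g) bs with hR
    have hRlen : R.length = bs.length := ihL
    have he0 : 0 ≤ i - (a + (m : Nat)) + band := by omega
    have helt : (i - (a + (m : Nat)) + band).toNat < R.length := by omega
    have hval : PySem.List.pyGetD R (i - (a + (m : Nat)) + band) []
        = R.getD (i - (a + (m : Nat)) + band).toNat [] := by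
      rw [PySem.List.pyGetD_eq_getElem _ _ he0 (by push_cast; omega),
        List.getD_eq_getElem _ _ helt]
    have hstep : pvStepF band i g R (a + (m : Nat))
        = R.set (i - (a + (m : Nat)) + band).toNat
            (R.getD (i - (a + (m : Nat)) + band).toNat [] ++ [g (a + (m : Nat))]) := by
      unfold pvStepF
      rw [PySem.List.pySetD_of_nonneg R _ he0, hval]
    constructor
    · rw [hstep, List.length_set, hRlen]
    · intro k hk
      rw [hstep]
      by_cases hke : k = (i - (a + (m : Nat)) + band).toNat
      · subst hke
        have hsetlen : (i - (a + (m : Nat)) + band).toNat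
            < (R.set (i - (a + (m : Nat)) + band).toNat
                (R.getD (i - (a + (m : Nat)) + band).toNat [] ++ [g (a + (m : Nat))])).length := by
          rw [List.length_set]; exact helt
        calc (R.set (i - (a + (m : Nat)) + band).toNat
                (R.getD (i - (a + (m : Nat)) + band).toNat [] ++ [g (a + (m : Nat))])).getD
                (i - (a + (m : Nat)) + band).toNat []
            = R.getD (i - (a + (m : Nat)) + band).toNat [] ++ [g (a + (m : Nat))] := by
              rw [List.getD_eq_getElem _ _ hsetlen, List.getElem_set_self hsetlen]
          _ = bs.getD (i - (a + (m : Nat)) + band).toNat []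
                ++ (if a ≤ i + band - ((i - (a + (m : Nat)) + band).toNat : Int)
                    ∧ i + band - ((i - (a + (m : Nat)) + band).toNat : Int) < a + (m : Nat) + 1
                  then [g (i + band - ((i - (a + (m : Nat)) + band).toNat : Int))] else []) := by
              rw [ihG _ hk]
              have het : (((i - (a + (m : Nat)) + band).toNat : Nat) : Int)
                  = i - (a + (m : Nat)) + band := by omega
              rw [het]
              have harg : i + band - (i - (a + (m : Nat)) + band) = a + (m : Nat) := by ring
              rw [harg, if_neg (by omega), if_pos (by omega), List.append_nil]
      · have hne' : i + band - (k : Int) ≠ a + (m : Nat) := by omega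
        have hklt : k < R.length := by omega
        have hsetlen : k < (R.set (i - (a + (m : Nat)) + band).toNat
              (R.getD (i - (a + (m : Nat)) + band).toNat [] ++ [g (a + (m : Nat))])).length := by
          rw [List.length_set]; exact hklt
        have h1 : (R.set (i - (a + (m : Nat)) + band).toNat
              (R.getD (i - (a + (m : Nat)) + band).toNat [] ++ [g (a + (m : Nat))])).getD k []
            = R.getD k [] :=
          calc (R.set (i - (a + (m : Nat)) + band).toNat
                  (R.getD (i - (a + (m : Nat)) + band).toNat [] ++ [g (a + (m : Nat))])).getD k []
              = (R.set (i - (a + (m : Nat)) + band).toNat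
                  (R.getD (i - (a + (m : Nat)) + band).toNat [] ++ [g (a + (m : Nat))]))[k] :=
                List.getD_eq_getElem _ _ hsetlen
            _ = R[k] := List.getElem_set_ne (fun h => hke h.symm) _
            _ = R.getD k [] := (List.getD_eq_getElem _ _ hklt).symm
        rw [h1, ihG _ hk]
        by_cases hc : a ≤ i + band - (k : Int) ∧ i + band - (k : Int) < a + (m : Nat)
        · rw [if_pos hc, if_pos ⟨hc.1, by omega⟩]
        · rw [if_neg hc, if_neg (fun hc2 => hc ⟨hc2.1, by omega⟩)]

theorem pvInner (band i : Int) (g : Int → String) (a b : Int)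
    (bs : List (List String)) (hlen : (bs.length : Int) = 2 * band + 1)
    (ha : i - band ≤ a) (hb : b ≤ i + band + 1) :
    (((PySem.List.pyRange a b).foldl (pvStepF band i g) bs).length = bs.length)
    ∧ ∀ k : Nat, k < bs.length →
      ((PySem.List.pyRange a b).foldl (pvStepF band i g) bs).getD k []
        = bs.getD k [] ++ (if a ≤ i + band - (k : Int) ∧ i + band - (k : Int) < b
            then [g (i + band - (k : Int))] else []) := by
  by_cases h : b ≤ a
  · rw [pvRangeNil h, List.foldl_nil]
    exact ⟨rfl, fun k _ => by rw [if_neg (by omega), List.append_nil]⟩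
  · push_neg at h
    have hb' : b = a + ((b - a).toNat : Int) := by omega
    rw [hb']
    exact pvInnerL band i g a (b - a).toNat bs hlen ha (by omega)

-- the whole scatter pass: bucket k ends as bs.getD k ++ pvSeg … rs s
theorem pvOuter (player band n : Int) :
    ∀ (rs : List (List Int)) (s : Int) (bs : List (List String)),
      (bs.length : Int) = 2 * band + 1 →
      (((PySem.List.enumerate rs s).foldl (pvRowF player band n) bs).length = bs.length)
      ∧ ∀ k : Nat, k < bs.length →
        ((PySem.List.enumerate rs s).foldl (pvRowF player band n) bs).getD k []
          = bs.getD k [] ++ pvSeg player band n k rs s := by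
  intro rs
  induction rs with
  | nil =>
    intro s bs _
    refine ⟨by rw [PySem.List.enumerate_nil, List.foldl_nil], fun k _ => ?_⟩
    rw [PySem.List.enumerate_nil, List.foldl_nil]
    simp only [pvSeg, List.append_nil]
  | cons r t ih =>
    intro s bs hlen
    rw [PySem.List.enumerate_cons, List.foldl_cons]
    have hrow : pvRowF player band n bs (s, r)
        = (PySem.List.pyRange (max (s - band) 0) (min (s + band) (n - 1) + 1)).foldl
            (pvStepF band s (fun j => pvCls player (PySem.List.pyGetD r j 0))) bs := rfl
    obtain ⟨h1len, h1get⟩ := pvInner band s (fun j => pvCls player (PySem.List.pyGetD r j 0))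
      (max (s - band) 0) (min (s + band) (n - 1) + 1) bs hlen (le_max_left _ _)
      (by have := min_le_left (s + band) (n - 1); omega)
    obtain ⟨h2len, h2get⟩ := ih (s + 1) (pvRowF player band n bs (s, r)) (by rw [hrow, h1len]; exact hlen)
    refine ⟨by rw [h2len, hrow, h1len], fun k hk => ?_⟩
    rw [h2get k (by rw [hrow, h1len]; exact hk), hrow, h1get k hk]
    simp only [pvSeg, List.append_assoc]

-- pvSeg as a guarded pass over row indices
theorem pvSeg_eq_flatMap (player band n : Int) (k : Nat) :
    ∀ (rs : List (List Int)) (s : Int),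
      pvSeg player band n k rs s = (List.range rs.length).flatMap (fun (m : Nat) =>
        if max ((s + (m : Int)) - band) 0 ≤ (s + (m : Int)) + band - (k : Int)
            ∧ (s + (m : Int)) + band - (k : Int) < min ((s + (m : Int)) + band) (n - 1) + 1
        then [pvCls player (PySem.List.pyGetD (rs.getD m []) ((s + (m : Int)) + band - (k : Int)) 0)]
        else []) := by
  intro rs
  induction rs with
  | nil => intro s; rfl
  | cons r t ih =>
    intro s
    simp only [pvSeg]
    rw [List.length_cons, List.range_succ_eq_map, List.flatMap_cons, List.flatMap_map, ih (s + 1)]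
    congr 1
    · norm_num
    · refine List.flatMap_congr fun m _ => ?_
      have hc : s + 1 + (m : Int) = s + ((m + 1 : Nat) : Int) := by push_cast; ring
      simp only [Nat.succ_eq_add_one, hc, List.getD_cons_succ]

-- guarded flatMap over range N, guard 'o ≤ m' (lower-band buckets)
theorem pvFlatMapGe {α : Type} (N o : Nat) (ho : o ≤ N) (f : Nat → List α) :
    (List.range N).flatMap (fun m => if o ≤ m then f m else [])
      = (List.range (N - o)).flatMap (fun t => f (o + t)) := by
  obtain ⟨M, hM⟩ : ∃ M, N = o + M := ⟨N - o, by omega⟩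
  subst hM
  rw [show o + M - o = M by omega, List.range_add, List.flatMap_append, List.flatMap_map]
  have h1 : (List.range o).flatMap (fun m => if o ≤ m then f m else []) = [] := by
    rw [List.flatMap_eq_nil_iff]
    intro m hm
    rw [if_neg (by simp only [List.mem_range] at hm; omega)]
  rw [h1, List.nil_append]
  exact List.flatMap_congr fun t _ => if_pos (by omega)

-- guarded flatMap over range N, guard 'm < L' (upper-band buckets)
theorem pvFlatMapLt {α : Type} (N L : Nat) (hL : L ≤ N) (f : Nat → List α) :
    (List.range N).flatMap (fun m => if m < L then f m else [])
      = (List.range L).flatMap f := by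
  obtain ⟨M, hM⟩ : ∃ M, N = L + M := ⟨N - L, by omega⟩
  subst hM
  rw [List.range_add, List.flatMap_append, List.flatMap_map]
  have h2 : (List.range M).flatMap (fun a => if L + a < L then f (L + a) else []) = [] := by
    rw [List.flatMap_eq_nil_iff]
    intro a _
    rw [if_neg (by omega)]
  rw [h2, List.append_nil]
  exact List.flatMap_congr fun t ht => if_pos (by simp only [List.mem_range] at ht; omega)

theorem pvFlatMapSingleton {α β : Type} (l : List α) (f : α → β) :
    l.flatMap (fun x => [f x]) = l.map f := by
  induction l with
  | nil => rfl
  | cons a t ih => rw [List.flatMap_cons, List.map_cons, ih]; rfl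

-- final bucket contents, lower band (offset o = k - BN ≥ 0; o = 0 is the main diagonal)
theorem pvBucketLower (player : Int) (board : List (List Int)) (BN o : Nat)
    (hBN : BN = board.length - 5) (hN : 1 ≤ board.length) (ho : o ≤ BN) :
    pvSeg player (BN : Int) (board.length : Int) (BN + o) board 0
      = (List.range (board.length - o)).map
          (fun t => pvCls player (PySem.List.pyGetD (board.getD (o + t) []) (t : Int) 0)) := by
  rw [pvSeg_eq_flatMap]
  have step1 : ∀ m ∈ List.range board.length,
      (if max ((0 + (m : Int)) - (BN : Int)) 0 ≤ (0 + (m : Int)) + (BN : Int) - ((BN + o : Nat) : Int)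
          ∧ (0 + (m : Int)) + (BN : Int) - ((BN + o : Nat) : Int) < min ((0 + (m : Int)) + (BN : Int)) ((board.length : Int) - 1) + 1
      then [pvCls player (PySem.List.pyGetD (board.getD m []) ((0 + (m : Int)) + (BN : Int) - ((BN + o : Nat) : Int)) 0)]
      else [])
      = (if o ≤ m then [pvCls player (PySem.List.pyGetD (board.getD m []) ((m : Int) - (o : Int)) 0)] else []) := by
    intro m hm
    rw [List.mem_range] at hm
    by_cases h : o ≤ m
    · rw [if_pos (by push_cast; omega), if_pos h]
      congr 2
      push_cast
      ring
    · rw [if_neg (by push_cast; omega), if_neg h]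
  rw [List.flatMap_congr step1,
    pvFlatMapGe board.length o (by omega) _,
    ← pvFlatMapSingleton (List.range (board.length - o)) _]
  refine List.flatMap_congr fun t _ => ?_
  have he : ((o + t : Nat) : Int) - (o : Int) = (t : Int) := by omega
  rw [he]

-- final bucket contents, upper band (offset o ≥ 1, bucket BN - o)
theorem pvBucketUpper (player : Int) (board : List (List Int)) (BN o : Nat)
    (hBN : BN = board.length - 5) (hN : 1 ≤ board.length) (ho : o ≤ BN) :
    pvSeg player (BN : Int) (board.length : Int) (BN - o) board 0
      = (List.range (board.length - o)).map
          (fun t => pvCls player (PySem.List.pyGetD (board.getD t []) ((o : Int) + (t : Int)) 0)) := by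
  rw [pvSeg_eq_flatMap]
  have step1 : ∀ m ∈ List.range board.length,
      (if max ((0 + (m : Int)) - (BN : Int)) 0 ≤ (0 + (m : Int)) + (BN : Int) - ((BN - o : Nat) : Int)
          ∧ (0 + (m : Int)) + (BN : Int) - ((BN - o : Nat) : Int) < min ((0 + (m : Int)) + (BN : Int)) ((board.length : Int) - 1) + 1
      then [pvCls player (PySem.List.pyGetD (board.getD m []) ((0 + (m : Int)) + (BN : Int) - ((BN - o : Nat) : Int)) 0)]
      else [])
      = (if m < board.length - o then [pvCls player (PySem.List.pyGetD (board.getD m []) ((o : Int) + (m : Int)) 0)] else []) := by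
    intro m hm
    rw [List.mem_range] at hm
    have hc : ((BN - o : Nat) : Int) = (BN : Int) - (o : Int) := by omega
    by_cases h : m < board.length - o
    · rw [if_pos (by rw [hc]; push_cast; omega), if_pos h]
      congr 2
      rw [hc]
      push_cast
      ring
    · rw [if_neg (by rw [hc]; push_cast; omega), if_neg h]
  rw [List.flatMap_congr step1,
    pvFlatMapLt board.length (board.length - o) (by omega) _,
    ← pvFlatMapSingleton (List.range (board.length - o)) _]

-- the initial bucket list is all-empty
theorem pvBuckets0 (L k : Nat) :
    ((List.range L).map (fun _ => ([] : List String))).getD k [] = [] := by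
  rcases Nat.lt_or_ge k L with h | h
  · rw [List.getD_eq_getElem _ _ (by simpa using h)]
    simp
  · rw [List.getD_eq_default _ _ (by simpa using h)]

theorem pvMain (board : List (List Int)) (player : Int)
    (hne : board ≠ []) :
    get_left_diags board player = get_left_diags_alt board player := by
  by_cases hsq : (board.length : Int) = ((PySem.List.pyGetD board 0 []).length : Int)
  · have hN : 0 < board.length := List.length_pos_iff.mpr hne
    have hn0 : ¬ ((board.length : Int) = 0) := by omega
    simp only [get_left_diags, get_left_diags_alt, if_pos hsq, if_neg hn0,
      PySem.List.foldl_append_singleton_eq_map]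
    set BN : Nat := board.length - 5 with hBN
    have hband : max ((board.length : Int) - 5) 0 = (BN : Int) := by omega
    have hcd : PySem.Int.floordiv (2 * (board.length : Int) - 1 - 8) 2 = (board.length : Int) - 5 := by
      rw [PySem.Int.floordiv_eq_ediv_of_pos (by norm_num)]; omega
    rw [hcd, hband]
    -- the bucket array after the scatter pass
    have hb0 : (PySem.List.pyRange 0 (2 * (BN : Int) + 1)).map (fun _ => ([] : List String))
        = (List.range (2 * BN + 1)).map (fun _ => ([] : List String)) := by
      rw [show (2 * (BN : Int) + 1) = ((2 * BN + 1 : Nat) : Int) by push_cast; ring,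
        PySem.List.pyRange_zero_natCast, List.map_map]
      rfl
    have hlen0 : (((List.range (2 * BN + 1)).map (fun _ => ([] : List String))).length : Int)
        = 2 * (BN : Int) + 1 := by simp
    obtain ⟨hblen, hbget⟩ := pvOuter player (BN : Int) (board.length : Int) board 0
      ((List.range (2 * BN + 1)).map (fun _ => ([] : List String))) hlen0
    set BK := (PySem.List.enumerate board).foldl (pvRowF player (BN : Int) (board.length : Int))
      ((List.range (2 * BN + 1)).map (fun _ => ([] : List String))) with hBK
    have hbucket : ∀ k : Nat, k < 2 * BN + 1 →
        BK.getD k [] = pvSeg player (BN : Int) (board.length : Int) k board 0 := by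
      intro k hk
      rw [hBK, hbget k (by simpa using hk), pvBuckets0, List.nil_append]
    have hget : ∀ k : Nat, k < 2 * BN + 1 →
        PySem.List.pyGetD BK ((k : Nat) : Int) [] = BK.getD k [] := by
      intro k _
      rw [PySem.List.pyGetD_natCast]
    -- index ranges on both sides
    have hrA : PySem.List.pyRange 0 ((board.length : Int) - 5)
        = (List.range BN).map (Nat.cast : Nat → Int) := by
      by_cases h : board.length ≤ 5
      · rw [pvRangeNil (by omega), hBN, show board.length - 5 = 0 by omega]; rfl
      · rw [show ((board.length : Int) - 5) = ((BN : Nat) : Int) by omega, PySem.List.pyRange_zero_natCast]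
    have hrB : PySem.List.pyRange 1 ((BN : Int) + 1)
        = ((List.range BN).map (Nat.cast : Nat → Int)).map (fun t => 1 + t) := by
      rw [show ((BN : Int) + 1) = 1 + ((BN : Nat) : Int) by ring, pvRangeShift]
      simp [List.map_map, Function.comp_def]
    rw [hrA, hrB, hb0]
    congr 1
    congr 1
    · -- main diagonal vs bucket BN
      refine congrArg (fun s => [s]) ?_
      have hmain := pvBucketLower player board BN 0 hBN hN (Nat.zero_le _)
      simp only [Nat.add_zero, Nat.zero_add, Nat.sub_zero] at hmain
      rw [pvFoldChain0 (PySem.List.pyRange 0 (board.length : Int)) player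
          (fun i => PySem.List.pyGetD (PySem.List.pyGetD board i []) i 0) "",
        String.empty_append, hget BN (by omega), hbucket BN (by omega), hmain,
        PySem.List.pyRange_zero_natCast, List.map_map]
      refine congrArg _ (List.map_congr_left fun t ht => ?_)
      simp only [Function.comp_apply, PySem.List.pyGetD_natCast]
    · -- lower band: A's diagonal t ↔ bucket BN + (t+1)
      simp only [List.map_map]
      refine List.map_congr_left fun t ht => ?_
      rw [List.mem_range] at ht
      simp only [Function.comp_apply]
      rw [pvFoldChain (PySem.List.pyRange 0 (board.length : Int)) player
          (fun j => PySem.List.pyGetD (PySem.List.pyGetD board ((t : Int) + 1 + j) []) j 0)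
          (fun j => (t : Int) + 1 + j > (board.length : Int) - 1) "",
        String.empty_append]
      have he1 : (BN : Int) + (1 + (t : Int)) = ((BN + (t + 1) : Nat) : Int) := by push_cast; ring
      have he2 : (1 + (t : Int)).toNat = t + 1 := by omega
      rw [he1, he2, hget (BN + (t + 1)) (by omega), hbucket (BN + (t + 1)) (by omega),
        pvBucketLower player board BN (t + 1) hBN hN (by omega)]
      refine pvDiagEq board.length (t + 1) (by omega) _ _ ?_ ?_
      · intro j hj
        have hc : ¬ ((t : Int) + 1 + (j : Int) > (board.length : Int) - 1) := by omega
        simp only [hc, false_or]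
        rw [show (t : Int) + 1 + (j : Int) = ((t + 1 + j : Nat) : Int) by push_cast; ring]
        simp only [PySem.List.pyGetD_natCast, pvCls]
      · intro j hj1 hj2
        rw [if_pos (Or.inl (by push_cast; omega))]
    · -- upper band: A's diagonal t ↔ bucket BN - (t+1)
      simp only [List.map_map]
      refine List.map_congr_left fun t ht => ?_
      rw [List.mem_range] at ht
      simp only [Function.comp_apply]
      rw [pvFoldChain (PySem.List.pyRange 0 (board.length : Int)) player
          (fun j => PySem.List.pyGetD (PySem.List.pyGetD board j []) ((t : Int) + 1 + j) 0)
          (fun j => (t : Int) + 1 + j > (board.length : Int) - 1) "",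
        String.empty_append]
      have he1 : (BN : Int) - (1 + (t : Int)) = ((BN - (t + 1) : Nat) : Int) := by omega
      have he2 : (1 + (t : Int)).toNat = t + 1 := by omega
      rw [he1, he2, hget (BN - (t + 1)) (by omega), hbucket (BN - (t + 1)) (by omega),
        pvBucketUpper player board BN (t + 1) hBN hN (by omega)]
      refine pvDiagEq board.length (t + 1) (by omega) _ _ ?_ ?_
      · intro j hj
        have hc : ¬ ((t : Int) + 1 + (j : Int) > (board.length : Int) - 1) := by omega
        simp only [hc, false_or]
        rw [show ((t + 1 : Nat) : Int) + (j : Int) = (t : Int) + 1 + (j : Int) by push_cast; ring]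
        simp only [PySem.List.pyGetD_natCast, pvCls]
      · intro j hj1 hj2
        rw [if_pos (Or.inl (by push_cast; omega))]
  · simp only [get_left_diags, get_left_diags_alt, if_neg hsq]
    norm_num

-- ===== VERDICT (by name: the statement is the Claim_ definition above) =====
theorem get_left_diags_spec : Claim_equal_get_left_diags := by
  intro board player _ hPre
  unfold Spec_get_left_diags
  exact pvMain board player hPre.1
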